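-- pv_equiv track=rewrite | github.com/siisi1324/RealSSAFY | algorithm&test/00_test/feb_finaltest/problem02.py | analyze_treasures
-- ===== SOURCE A (Python) =====
-- def analyze_treasures(treasure_list, threshold):
--     treaser_dict = {}
--     # setdefault사용하기??
--     cnt = 0
--     for i in treasure_list:
--         if i not in treaser_dict:
--             treaser_dict[i] = 1
--         else:
--             treaser_dict[i]+=1
--             # 여기서도 그냥 treaser_dict[i] = 1만을 쓰게 된다면 (if, else문 없이)
--             # 초기값 딕셔너리 설정에서 에러가 뜬다.
--
--     for j in treaser_dict:
--         if treaser_dict[j] > threshold: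
--             cnt += 1
--
--     return treaser_dict, cnt
-- ===== SOURCE B (Python) =====
-- def analyze_treasures(treasure_list, threshold):
--     # One pass: maintain the exceed-count incrementally while counting,
--     # instead of scanning the finished dict in a second loop.
--     counts = {}
--     cnt = 0
--     for i in treasure_list:
--         old = counts.get(i)
--         if old is None:
--             counts[i] = 1
--             if 1 > threshold:
--                 cnt += 1
--         else:
--             counts[i] = old + 1
--             if old <= threshold < old + 1:
--                 cnt += 1
--     return counts, cnt
-- ===== Notes on version B (the rewrite author's own statement) =====
-- stated objective: alternative
-- what changed: Fused A's two loops into a single pass that maintains the above-threshold count incrementally (incrementing it exactly when a key's count crosses the threshold), instead of building the dict first and then scanning it.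
import Mathlib
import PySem

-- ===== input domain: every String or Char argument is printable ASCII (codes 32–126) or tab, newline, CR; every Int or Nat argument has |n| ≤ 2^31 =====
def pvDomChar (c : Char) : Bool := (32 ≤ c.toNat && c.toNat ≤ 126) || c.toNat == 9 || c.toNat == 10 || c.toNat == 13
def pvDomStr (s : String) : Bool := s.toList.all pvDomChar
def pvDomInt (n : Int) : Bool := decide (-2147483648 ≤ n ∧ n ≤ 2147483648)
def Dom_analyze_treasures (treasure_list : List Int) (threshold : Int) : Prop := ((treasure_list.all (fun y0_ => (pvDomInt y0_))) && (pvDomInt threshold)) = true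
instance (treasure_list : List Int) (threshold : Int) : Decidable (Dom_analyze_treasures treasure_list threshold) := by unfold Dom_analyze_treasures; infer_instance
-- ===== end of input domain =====

-- B fuses A's two loops into a single pass that maintains the above-threshold count incrementally (same cost, different decomposition); A's return value only is compared (neither mutates its arguments).


-- ===== PORT A =====
def analyze_treasures (treasure_list : List Int) (threshold : Int) : (List (Int × Int)) × Int :=
  let treaser_dict : PySem.Dict Int Int :=
    treasure_list.foldl (fun d i =>
      if d.contains i = false then d.insert i 1
      else d.insert i (d.getD i 0 + 1)) PySem.Dict.empty
  let cnt : Int :=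
    treaser_dict.keys.foldl (fun cnt j =>
      if treaser_dict.getD j 0 > threshold then cnt + 1 else cnt) 0
  (treaser_dict.items, cnt)

-- ===== PORT B =====
def analyze_treasures_alt (treasure_list : List Int) (threshold : Int) : (List (Int × Int)) × Int :=
  let r : PySem.Dict Int Int × Int :=
    treasure_list.foldl (fun s i =>
      match s.1.get? i with
      | none => (s.1.insert i 1, if 1 > threshold then s.2 + 1 else s.2)
      | some old => (s.1.insert i (old + 1),
          if old ≤ threshold ∧ threshold < old + 1 then s.2 + 1 else s.2))
      (PySem.Dict.empty, 0)
  (r.1.items, r.2)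

-- ===== PRECONDITION & SPEC =====
def Spec_analyze_treasures (treasure_list : List Int) (threshold : Int) (out : (List (Int × Int)) × Int) : Prop := out = analyze_treasures_alt treasure_list threshold
instance (treasure_list : List Int) (threshold : Int) (out : (List (Int × Int)) × Int) : Decidable (Spec_analyze_treasures treasure_list threshold out) := by unfold Spec_analyze_treasures; infer_instance

-- ===== CLAIM (what is proved, stated in full; the proofs are below) =====
def Claim_equal_analyze_treasures : Prop := ∀ (treasure_list : List Int) (threshold : Int), Dom_analyze_treasures treasure_list threshold → Spec_analyze_treasures treasure_list threshold (analyze_treasures treasure_list threshold)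

-- ===== LEMMAS AND PROOFS =====

-- countP under a pointwise change of the predicate at a single element of a Nodup list
theorem countP_change_at {x : Int} (l : List Int) (hnd : l.Nodup) (hx : x ∈ l)
    (p q : Int → Bool) (hagree : ∀ y ∈ l, y ≠ x → p y = q y) :
    l.countP q + (if p x then 1 else 0) = l.countP p + (if q x then 1 else 0) := by
  induction l with
  | nil => simp at hx
  | cons y l ih =>
    rcases List.nodup_cons.mp hnd with ⟨hy, hnd'⟩
    by_cases hyx : y = x
    · subst hyx
      have hnx : y ∉ l := hy
      have : l.countP p = l.countP q := by
        apply List.countP_congr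
        intro z hz
        have := hagree z (List.mem_cons_of_mem _ hz) (fun h => hnx (h ▸ hz))
        simp [this]
      simp only [List.countP_cons, this]
      omega
    · have hxl : x ∈ l := by
        rcases List.mem_cons.mp hx with h | h
        · exact absurd h.symm hyx
        · exact h
      have hpy : p y = q y := hagree y (List.mem_cons_self) hyx
      have := ih hnd' hxl (fun z hz hzx => hagree z (List.mem_cons_of_mem _ hz) hzx)
      simp only [List.countP_cons, hpy]
      omega

-- invariant of B's fused loop against A's dict-building loop:
-- the running count always equals the number of keys whose count exceeds the threshold
theorem fused_invariant (t : Int) (l : List Int) :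
    ∀ (d : PySem.Dict Int Int) (cnt : Int), d.keys.Nodup →
    cnt = (d.keys.countP (fun k => decide (d.getD k 0 > t)) : Int) →
    (l.foldl (fun (s : PySem.Dict Int Int × Int) i =>
      match s.1.get? i with
      | none => (s.1.insert i 1, if 1 > t then s.2 + 1 else s.2)
      | some old => (s.1.insert i (old + 1),
          if old ≤ t ∧ t < old + 1 then s.2 + 1 else s.2)) (d, cnt))
    = (let d' := l.foldl (fun d i =>
        if d.contains i = false then d.insert i 1
        else d.insert i (d.getD i 0 + 1)) d;
       (d', (d'.keys.countP (fun k => decide (d'.getD k 0 > t)) : Int)))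
    ∧ (l.foldl (fun d i =>
        if d.contains i = false then d.insert i 1
        else d.insert i (d.getD i 0 + 1)) d).keys.Nodup := by
  induction l with
  | nil =>
    intro d cnt hnd hcnt
    simp [hcnt]
    exact hnd
  | cons x l ih =>
    intro d cnt hnd hcnt
    simp only [List.foldl_cons]
    cases hget : d.get? x with
    | none =>
      have hcon : d.contains x = false := (PySem.Dict.get?_eq_none_iff_contains d x).mp hget
      have hxnot : x ∉ d.keys := fun h => by
        simp [(PySem.Dict.contains_iff_mem_keys d x).mpr h] at hcon
      have hkeys : (d.insert x 1).keys = d.keys ++ [x] :=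
        PySem.Dict.keys_insert_of_not_contains d 1 hcon
      have hnd' : (d.insert x 1).keys.Nodup := PySem.Dict.nodup_keys_insert d x 1 hnd
      have hcnt' : (if 1 > t then cnt + 1 else cnt)
          = (((d.insert x 1).keys.countP (fun k => decide ((d.insert x 1).getD k 0 > t)) : Nat) : Int) := by
        rw [hkeys, List.countP_append]
        have h1 : d.keys.countP (fun k => decide ((d.insert x 1).getD k 0 > t))
            = d.keys.countP (fun k => decide (d.getD k 0 > t)) := by
          apply List.countP_congr
          intro y hy
          have hyx : y ≠ x := fun h => hxnot (h ▸ hy)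
          rw [PySem.Dict.getD_insert]
          simp [hyx]
        have h2 : (d.insert x 1).getD x 0 = 1 := by
          rw [PySem.Dict.getD_insert]; simp
        rw [h1]
        simp only [List.countP_cons, List.countP_nil, h2]
        by_cases ht : 1 > t <;> simp [ht, hcnt]
      simp only [hcon]
      simp only [if_true]
      exact ih (d.insert x 1) _ hnd' hcnt'
    | some old =>
      have hcon : d.contains x = true := by
        have := PySem.Dict.get?_eq_none_iff_contains d x
        cases h : d.contains x
        · rw [this.mpr h] at hget; exact absurd hget (by simp)
        · rfl
      have hgetD : d.getD x 0 = old := PySem.Dict.getD_of_get?_eq_some d 0 hget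
      have hxmem : x ∈ d.keys := (PySem.Dict.contains_iff_mem_keys d x).mp hcon
      have hkeys : (d.insert x (old + 1)).keys = d.keys :=
        PySem.Dict.keys_insert_of_contains d (old + 1) hcon
      have hnd' : (d.insert x (old + 1)).keys.Nodup := PySem.Dict.nodup_keys_insert d x _ hnd
      have hchg := countP_change_at d.keys hnd hxmem
        (fun k => decide (d.getD k 0 > t))
        (fun k => decide ((d.insert x (old + 1)).getD k 0 > t))
        (by intro y hy hyx; simp [PySem.Dict.getD_insert, hyx])
      have hnewx : (d.insert x (old + 1)).getD x 0 = old + 1 := by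
        rw [PySem.Dict.getD_insert]; simp
      have hcnt' : (if old ≤ t ∧ t < old + 1 then cnt + 1 else cnt)
          = (((d.insert x (old+1)).keys.countP (fun k => decide ((d.insert x (old+1)).getD k 0 > t)) : Nat) : Int) := by
        rw [hkeys]
        simp only [hgetD, hnewx] at hchg
        by_cases h1 : old > t <;> by_cases h2 : old + 1 > t <;>
          simp [h1, h2, hcnt] at hchg ⊢ <;> omega
      simp only [hcon, hgetD, Bool.true_eq_false, if_false]
      exact ih (d.insert x (old + 1)) _ hnd' hcnt'

-- a Prop-ite counting loop is countP
theorem foldl_if_count (p : Int → Prop) [DecidablePred p] (l : List Int) :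
    l.foldl (fun c j => if p j then c + 1 else c) (0:Int) = (l.countP (fun j => decide (p j)) : Int) := by
  have := PySem.List.foldl_count_if (fun j => decide (p j)) l 0
  simpa using this

-- ===== VERDICT (by name: the statement is the Claim_ definition above) =====
theorem analyze_treasures_spec : Claim_equal_analyze_treasures := by
  intro l t _
  unfold Spec_analyze_treasures analyze_treasures analyze_treasures_alt
  obtain ⟨h1, -⟩ := fused_invariant t l PySem.Dict.empty 0 PySem.Dict.nodup_keys_empty (by simp)
  rw [h1]
  simp only []
  congr 1
  exact foldl_if_count _ _
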